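-- pv_equiv track=rewrite | github.com/HasenaarDean/INTRODUCTION-TO-COMPUTER-SCIENCE | ex6/ex6.py | choose_best_avg
-- ===== SOURCE A (Python) =====
-- def compare_pixel(pixel1, pixel2):
--
--     """
--     This function calculates the distance between 2 different pixels
--     """
--
--     r1 = pixel1[0]
--     r2 = pixel2[0]
--     g1 = pixel1[1]
--     g2 = pixel2[1]
--     b1 = pixel1[2]
--     b2 = pixel2[2]
--     return abs(r1-r2) + abs(g1-g2) + abs(b1-b2)
--
-- def choose_best_avg(avg_list, obj_avg):
--
--     """
--     This function gets an input list of averages and calculates the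
--     index of the best average which is closest to the input averaged color
--     of an image.
--     this function helps us to implement the function: get_best_tiles
--     """
--
--     best_avg = compare_pixel(avg_list[0], obj_avg)
--     best_index = 0
--     for i, avg in enumerate(avg_list):
--         if compare_pixel(avg, obj_avg) < best_avg:
--             best_avg = compare_pixel(avg, obj_avg)
--             best_index = i
--     return best_index
-- ===== SOURCE B (Python) =====
-- def compare_pixel(pixel1, pixel2):
--     return (abs(pixel1[0] - pixel2[0])
--             + abs(pixel1[1] - pixel2[1])
--             + abs(pixel1[2] - pixel2[2]))
--
-- def choose_best_avg(avg_list, obj_avg):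
--     # Stable sort of the indices by distance to obj_avg; the head of the
--     # sorted order is the first index attaining the minimal distance.
--     order = sorted(range(len(avg_list)),
--                    key=lambda i: compare_pixel(avg_list[i], obj_avg))
--     return order[0]
-- ===== Notes on version B (the rewrite author's own statement) =====
-- stated objective: alternative
-- what changed: Replaces A's running-minimum scan holding (best distance, best index) state with sorting the index list by distance (Python's stable sort) and returning the head of the sorted order; stability makes the head the first index of the minimum, matching A's tie-breaking.
import Mathlib
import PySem

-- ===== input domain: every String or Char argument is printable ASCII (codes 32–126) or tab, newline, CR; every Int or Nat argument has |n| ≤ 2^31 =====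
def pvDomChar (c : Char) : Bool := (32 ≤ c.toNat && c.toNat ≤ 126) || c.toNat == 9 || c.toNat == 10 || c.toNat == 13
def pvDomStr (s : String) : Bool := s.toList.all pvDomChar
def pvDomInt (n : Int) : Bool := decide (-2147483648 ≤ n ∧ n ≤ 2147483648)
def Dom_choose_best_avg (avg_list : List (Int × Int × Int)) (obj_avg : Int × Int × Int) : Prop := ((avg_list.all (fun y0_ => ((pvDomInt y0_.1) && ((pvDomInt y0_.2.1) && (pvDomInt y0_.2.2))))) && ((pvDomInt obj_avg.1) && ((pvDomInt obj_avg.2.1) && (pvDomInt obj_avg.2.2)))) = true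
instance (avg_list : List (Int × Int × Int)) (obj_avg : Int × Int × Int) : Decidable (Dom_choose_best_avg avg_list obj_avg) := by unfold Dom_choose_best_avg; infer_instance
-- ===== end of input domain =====

-- B replaces A's running-minimum scan with a stable sort of the index list by
-- distance and takes the head of the sorted order — a different algorithm
-- (sort-then-take-first) of similar practical cost, not claimed faster.


-- ===== PORT A =====
def compare_pixel (pixel1 pixel2 : Int × Int × Int) : Int :=
  |pixel1.1 - pixel2.1| + |pixel1.2.1 - pixel2.2.1| + |pixel1.2.2 - pixel2.2.2|

def choose_best_avg (avg_list : List (Int × Int × Int)) (obj_avg : Int × Int × Int) : Int :=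
  -- avg_list[0]: IndexError on []; Pre_ guarantees nonemptiness, headD is exact on Pre_
  let best_avg := compare_pixel (avg_list.headD (0, 0, 0)) obj_avg
  let st := (PySem.List.enumerate avg_list).foldl
    (fun (s : Int × Int) (p : Int × (Int × Int × Int)) =>
      if compare_pixel p.2 obj_avg < s.1 then (compare_pixel p.2 obj_avg, p.1) else s)
    (best_avg, 0)
  st.2

-- ===== PORT B =====
def compare_pixel_b (pixel1 pixel2 : Int × Int × Int) : Int :=
  |pixel1.1 - pixel2.1| + |pixel1.2.1 - pixel2.2.1| + |pixel1.2.2 - pixel2.2.2|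

def choose_best_avg_alt (avg_list : List (Int × Int × Int)) (obj_avg : Int × Int × Int) : Int :=
  -- sorted(range(len(avg_list)), key=…): every index of the range is in bounds,
  -- so pyGetD with a default is exact for avg_list[i] inside the key
  let order := PySem.List.sorted (PySem.List.pyRange 0 (avg_list.length : Int))
    (fun i => compare_pixel_b (PySem.List.pyGetD avg_list i (0, 0, 0)) obj_avg)
  -- order[0]: IndexError on the empty list; Pre_ guarantees nonemptiness
  (PySem.List.pyGet? order 0).getD 0

-- ===== PRECONDITION & SPEC =====
-- Pre_ excludes the empty list, on which both A and B raise IndexError.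
def Pre_choose_best_avg (avg_list : List (Int × Int × Int)) (obj_avg : Int × Int × Int) : Prop := avg_list ≠ []
instance (avg_list : List (Int × Int × Int)) (obj_avg : Int × Int × Int) : Decidable (Pre_choose_best_avg avg_list obj_avg) := by unfold Pre_choose_best_avg; infer_instance
def pvWitness_choose_best_avg : (List (Int × Int × Int)) × (Int × Int × Int) := ([(1, 2, 3), (4, 5, 6)], (3, 3, 3))

def Spec_choose_best_avg (avg_list : List (Int × Int × Int)) (obj_avg : Int × Int × Int) (out : Int) : Prop := out = choose_best_avg_alt avg_list obj_avg
instance (avg_list : List (Int × Int × Int)) (obj_avg : Int × Int × Int) (out : Int) : Decidable (Spec_choose_best_avg avg_list obj_avg out) := by unfold Spec_choose_best_avg; infer_instance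

-- ===== CLAIM (what is proved, stated in full; the proofs are below) =====
def Claim_equal_choose_best_avg : Prop := ∀ (avg_list : List (Int × Int × Int)) (obj_avg : Int × Int × Int), Dom_choose_best_avg avg_list obj_avg → Pre_choose_best_avg avg_list obj_avg → Spec_choose_best_avg avg_list obj_avg (choose_best_avg avg_list obj_avg)

-- ===== LEMMAS AND PROOFS =====

-- The strict running-minimum step on indices (shared shape of both sides).
def pvStep (key : Int → Int) (j i : Int) : Int := if key i < key j then i else j

-- A's loop over (index, value) pairs, with the invariant "b = key j", collapses
-- to the strict running-minimum over the first components.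
theorem foldA_eq_foldStep (obj_avg : Int × Int × Int) (key : Int → Int) :
    ∀ (ps : List (Int × (Int × Int × Int))),
      (∀ p ∈ ps, compare_pixel p.2 obj_avg = key p.1) → ∀ (j : Int),
      ps.foldl
        (fun (s : Int × Int) (p : Int × (Int × Int × Int)) =>
          if compare_pixel p.2 obj_avg < s.1 then (compare_pixel p.2 obj_avg, p.1) else s)
        (key j, j)
      = (key ((ps.map (·.1)).foldl (pvStep key) j),
         (ps.map (·.1)).foldl (pvStep key) j) := by
  intro ps
  induction ps with
  | nil => intro _ j; simp
  | cons p t ih =>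
    intro hk j
    have hp : compare_pixel p.2 obj_avg = key p.1 := hk p List.mem_cons_self
    have ht : ∀ q ∈ t, compare_pixel q.2 obj_avg = key q.1 :=
      fun q hq => hk q (List.mem_cons_of_mem _ hq)
    simp only [List.foldl_cons, List.map_cons, hp, pvStep]
    by_cases h : key p.1 < key j
    · rw [if_pos h, if_pos h]; exact ih ht p.1
    · rw [if_neg h, if_neg h]; exact ih ht j

-- Head of the stable insertion of x: x goes in front iff it is strictly smaller.
theorem insertBy_head (key : Int → Int) (x : Int) :
    ∀ (acc : List Int) (h : Int) (t : List Int), acc = h :: t →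
    ∃ t', PySem.List.insertBy (fun a b => decide (key a < key b)) x acc
          = pvStep key h x :: t' := by
  intro acc h t hacc
  subst hacc
  simp only [PySem.List.insertBy, pvStep]
  by_cases hxh : key x < key h
  · exact ⟨h :: t, by simp [hxh]⟩
  · exact ⟨PySem.List.insertBy (fun a b => decide (key a < key b)) x t, by simp [hxh]⟩

-- Head of insertion-sorting xs into a nonempty accumulator = strict running minimum.
theorem foldl_insertBy_head (key : Int → Int) :
    ∀ (xs : List Int) (h : Int) (t : List Int),
    ∃ t', xs.foldl
        (fun acc x => PySem.List.insertBy (fun a b => decide (key a < key b)) x acc)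
        (h :: t)
      = xs.foldl (pvStep key) h :: t' := by
  intro xs
  induction xs with
  | nil => intro h t; exact ⟨t, rfl⟩
  | cons x xs ih =>
    intro h t
    obtain ⟨t', ht'⟩ := insertBy_head key x (h :: t) h t rfl
    simp only [List.foldl_cons, ht']
    exact ih (pvStep key h x) t'

-- Head of sorted(x :: xs, key) = strict running minimum from x over xs (stability).
theorem sorted_cons_head (key : Int → Int) (x : Int) (xs : List Int) :
    ∃ t', PySem.List.sorted (x :: xs) key = xs.foldl (pvStep key) x :: t' := by
  rw [PySem.List.sorted_eq_foldl_insertBy]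
  simp only [List.foldl_cons, PySem.List.insertBy]
  exact foldl_insertBy_head key xs x []

-- ===== VERDICT (by name: the statement is the Claim_ definition above) =====
theorem choose_best_avg_spec : Claim_equal_choose_best_avg := by
  intro avg_list obj_avg _ hpre
  unfold Spec_choose_best_avg choose_best_avg choose_best_avg_alt
  match avg_list with
  | [] => exact absurd rfl hpre
  | x :: xs =>
    set key : Int → Int :=
      fun i => compare_pixel_b (PySem.List.pyGetD (x :: xs) i (0, 0, 0)) obj_avg with hkey
    -- A side: collapse the pair fold to the index fold
    have hk0 : compare_pixel x obj_avg = key 0 := by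
      simp [hkey, compare_pixel, compare_pixel_b]
    have hmem : ∀ p ∈ PySem.List.enumerate (x :: xs) 0,
        compare_pixel p.2 obj_avg = key p.1 := by
      intro p hp
      obtain ⟨k, hklt, rfl⟩ := (PySem.List.mem_enumerate_iff _ _ _).1 hp
      simp only [hkey, zero_add]
      rw [PySem.List.pyGetD_natCast]
      simp [List.getElem?_eq_getElem hklt, compare_pixel, compare_pixel_b]
    have hA := foldA_eq_foldStep obj_avg key (PySem.List.enumerate (x :: xs) 0) hmem 0
    have hfst : (PySem.List.enumerate (x :: xs) 0).map (·.1)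
        = PySem.List.pyRange 0 ((x :: xs).length : Int) := by
      have := PySem.List.map_fst_enumerate (x :: xs) 0
      simpa using this
    -- B side: the range is nonempty, peel its head
    have hlen : (0 : Int) < ((x :: xs).length : Int) := by
      simp only [List.length_cons]; positivity
    have hrange : PySem.List.pyRange 0 ((x :: xs).length : Int)
        = 0 :: PySem.List.pyRange 1 ((x :: xs).length : Int) := by
      simpa using PySem.List.pyRange_one_cons hlen
    obtain ⟨t', ht'⟩ := sorted_cons_head key 0 (PySem.List.pyRange 1 ((x :: xs).length : Int))
    simp only [List.headD_cons, hk0, hA, hfst, hrange, ht']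
    have hstep0 : pvStep key 0 0 = 0 := by simp [pvStep]
    simp only [List.foldl_cons, hstep0]
    simp [PySem.List.pyGet?, PySem.List.pyIdx?]
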